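-- pv_equiv track=rewrite | github.com/swiss-ai/fm-service | config.py | parse_hardware_info
-- ===== SOURCE A (Python) =====
-- def parse_hardware_info(hardware_info):
--     """
--     Parse hardware information and return a string representation.
--
--     Args:
--         hardware_info (dict): Dictionary containing hardware information
--
--     Returns:
--         str: String representation of the hardware in the format "Nx[Spec]"
--     """
--     if not hardware_info or "gpus" not in hardware_info or not hardware_info["gpus"]:
--         return "Unknown"
--
--     # Group GPUs by name
--     gpu_counts = {}
--     for gpu in hardware_info["gpus"]:
--         name = gpu.get("name", "Unknown GPU")
--         gpu_counts[name] = gpu_counts.get(name, 0) + 1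
--
--     # Format the output
--     result = []
--     for gpu_name, count in gpu_counts.items():
--         result.append(f"{count}x {gpu_name}")
--
--     return ", ".join(result)
-- ===== SOURCE B (Python) =====
-- def parse_hardware_info(hardware_info):
--     if not hardware_info or "gpus" not in hardware_info or not hardware_info["gpus"]:
--         return "Unknown"
--     names = [gpu.get("name", "Unknown GPU") for gpu in hardware_info["gpus"]]
--     parts = []
--     while names:
--         name = names[0]
--         rest = [n for n in names if n != name]
--         parts.append(f"{len(names) - len(rest)}x {name}")
--         names = rest
--     return ", ".join(parts)
-- ===== Notes on version B (the rewrite author's own statement) =====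
-- stated objective: alternative
-- what changed: Replaces A's single-pass counting dict with a removal-based recursion: repeatedly take the first remaining name, count its copies as the length drop when filtering out all its occurrences, and recurse on the shrunken list; no dictionary or counter is kept.
import Mathlib
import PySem

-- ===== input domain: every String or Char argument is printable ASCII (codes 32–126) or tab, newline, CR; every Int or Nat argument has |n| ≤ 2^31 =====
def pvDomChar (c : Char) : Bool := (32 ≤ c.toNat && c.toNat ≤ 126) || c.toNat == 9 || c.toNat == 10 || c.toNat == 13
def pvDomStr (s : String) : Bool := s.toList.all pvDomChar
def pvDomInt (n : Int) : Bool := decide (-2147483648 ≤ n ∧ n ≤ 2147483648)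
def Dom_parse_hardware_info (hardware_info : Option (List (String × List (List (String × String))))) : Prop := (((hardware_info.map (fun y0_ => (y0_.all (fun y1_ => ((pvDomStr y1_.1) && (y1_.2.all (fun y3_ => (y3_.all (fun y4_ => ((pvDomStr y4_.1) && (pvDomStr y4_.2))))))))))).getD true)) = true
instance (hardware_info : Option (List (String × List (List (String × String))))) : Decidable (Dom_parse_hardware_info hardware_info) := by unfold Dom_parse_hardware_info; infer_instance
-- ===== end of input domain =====

-- B change (one honest line): B replaces A's single-pass counting dict with a
-- removal-based recursion — take the first remaining name, count its copies as the
-- length drop when filtering it out, recurse on the rest; objective: alternative.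

-- ===== PORT A =====
def parse_hardware_info (hardware_info : Option (List (String × List (List (String × String))))) : String :=
  match hardware_info with
  | none => "Unknown"
  | some d =>
    if d.isEmpty then "Unknown"
    else
      match (PySem.Dict.mk d).get? "gpus" with
      | none => "Unknown"
      | some gpus =>
        if gpus.isEmpty then "Unknown"
        else
          let gpu_counts : PySem.Dict String Int :=
            gpus.foldl (fun cnts gpu =>
              let name := (PySem.Dict.mk gpu).getD "name" "Unknown GPU"
              cnts.insert name (cnts.getD name 0 + 1)) PySem.Dict.empty
          let result : List String :=
            gpu_counts.items.foldl (fun acc p => acc ++ [PySem.Int.toStr p.2 ++ "x " ++ p.1]) []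
          PySem.Str.join ", " result

-- ===== PORT B =====
-- B's while-loop: peel off the first name, filter out all its occurrences,
-- the count is the length difference; recurse on the filtered remainder.
def pvAltLoop : List String → List String
  | [] => []
  | name :: t =>
    let rest := (name :: t).filter (fun n => n ≠ name)
    (PySem.Int.toStr (((name :: t).length - rest.length : Nat) : Int) ++ "x " ++ name) :: pvAltLoop rest
termination_by l => l.length
decreasing_by
  have := List.length_filter_le (fun n => !decide (n = name)) t
  simp only [List.filter_cons, decide_not, List.length_cons]
  simp at this ⊢
  omega

def parse_hardware_info_alt (hardware_info : Option (List (String × List (List (String × String))))) : String :=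
  match hardware_info with
  | none => "Unknown"
  | some d =>
    if d.isEmpty then "Unknown"
    else
      match (PySem.Dict.mk d).get? "gpus" with
      | none => "Unknown"
      | some gpus =>
        if gpus.isEmpty then "Unknown"
        else
          let names : List String :=
            gpus.map (fun gpu => (PySem.Dict.mk gpu).getD "name" "Unknown GPU")
          PySem.Str.join ", " (pvAltLoop names)

-- ===== PRECONDITION & SPEC =====
def Spec_parse_hardware_info (hardware_info : Option (List (String × List (List (String × String))))) (out : String) : Prop := out = parse_hardware_info_alt hardware_info
instance (hardware_info : Option (List (String × List (List (String × String))))) (out : String) : Decidable (Spec_parse_hardware_info hardware_info out) := by unfold Spec_parse_hardware_info; infer_instance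

-- ===== CLAIM (what is proved, stated in full; the proofs are below) =====
def Claim_equal_parse_hardware_info : Prop := ∀ (hardware_info : Option (List (String × List (List (String × String))))), Dom_parse_hardware_info hardware_info → Spec_parse_hardware_info hardware_info (parse_hardware_info hardware_info)

-- ===== LEMMAS AND PROOFS =====

-- A's append-fold over the items is just a map over the items
theorem pv_foldl_append_fmt (l : List (String × Int)) :
    l.foldl (fun acc p => acc ++ [PySem.Int.toStr p.2 ++ "x " ++ p.1]) [] =
      l.map (fun p => PySem.Int.toStr p.2 ++ "x " ++ p.1) := by
  simpa using PySem.List.foldl_append_singleton_eq_map (f := fun p : String × Int => PySem.Int.toStr p.2 ++ "x " ++ p.1) (l := l)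

-- A's counting loop keyed by the name function is the counter of the name list
theorem pv_count_loop_eq_counter (gpus : List (List (String × String))) :
    gpus.foldl (fun cnts gpu =>
        let name := (PySem.Dict.mk gpu).getD "name" "Unknown GPU"
        cnts.insert name (cnts.getD name 0 + 1)) PySem.Dict.empty =
      PySem.Dict.counter (gpus.map (fun gpu => (PySem.Dict.mk gpu).getD "name" "Unknown GPU")) := by
  rw [← PySem.Dict.foldl_insert_getD_add_one_eq_counter, List.foldl_map]

-- The length drop when filtering out a value is that value's multiplicity.
theorem pv_len_sub (name : String) (l : List String) :
    l.length - (l.filter (fun n => n ≠ name)).length = l.count name := by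
  induction l with
  | nil => simp
  | cons x l ih =>
    have hle := List.length_filter_le (fun n => decide (n ≠ name)) l
    by_cases hx : x = name
    · subst hx
      simp only [List.filter_cons, List.count_cons, List.length_cons] at *
      simp at *
      omega
    · simp only [List.filter_cons, List.count_cons, List.length_cons] at *
      simp [hx] at *
      omega

-- Adding an element already present leaves a PySem.Set unchanged, so the fold over
-- a list may skip every occurrence of an element of the accumulator.
theorem pv_foldl_add_skip (name : String) (t : List String) :
    ∀ acc : List String, name ∈ acc →
      t.foldl PySem.Set.add acc = (t.filter (fun n => n ≠ name)).foldl PySem.Set.add acc := by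
  induction t with
  | nil => intro acc _; rfl
  | cons x l ih =>
    intro acc h
    by_cases hx : x = name
    · subst hx
      have hadd : PySem.Set.add acc x = acc := by
        simp [PySem.Set.add, PySem.Set.contains, h]
      simp only [List.filter_cons, List.foldl_cons, hadd]
      simp only [decide_not] at *
      simpa using ih acc h
    · have hkeep : (x :: l).filter (fun n => n ≠ name) = x :: l.filter (fun n => n ≠ name) := by
        simp [hx]
      rw [hkeep, List.foldl_cons, List.foldl_cons]
      exact ih _ ((PySem.Set.mem_add acc x name).mpr (Or.inl h))

-- Folding Set.add over elements all different from `name` keeps `name` at the head.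
theorem pv_foldl_add_cons (name : String) (l : List String) (h : ∀ x ∈ l, x ≠ name) :
    ∀ acc : List String, l.foldl PySem.Set.add (name :: acc) = name :: l.foldl PySem.Set.add acc := by
  induction l with
  | nil => intro acc; rfl
  | cons x l ih =>
    intro acc
    have hx : x ≠ name := h x (by simp)
    have hrest : ∀ y ∈ l, y ≠ name := fun y hy => h y (by simp [hy])
    have hadd : PySem.Set.add (name :: acc) x = name :: PySem.Set.add acc x := by
      simp [PySem.Set.add, PySem.Set.contains, hx]
      split <;> rfl
    rw [List.foldl_cons, hadd, List.foldl_cons, ih hrest]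

-- First-occurrence dedup of a cons: the head, then the dedup of the tail with
-- all copies of the head removed.
theorem pv_dedup_cons (name : String) (t : List String) :
    PySem.List.dedup (name :: t) =
      name :: PySem.List.dedup ((name :: t).filter (fun n => n ≠ name)) := by
  simp only [PySem.List.dedup_eq_ofList, PySem.Set.ofList_eq_foldl, List.foldl_cons]
  have hadd : PySem.Set.add ([] : List String) name = [name] := by
    simp [PySem.Set.add, PySem.Set.contains]
  rw [hadd, pv_foldl_add_skip name t [name] (by simp)]
  have hfc : (name :: t).filter (fun n => n ≠ name) = t.filter (fun n => n ≠ name) := by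
    simp
  rw [hfc]
  exact pv_foldl_add_cons name _ (fun x hx => by
    simp only [List.mem_filter, decide_not, Bool.not_eq_eq_eq_not] at hx
    simpa using hx.2) []

-- B's removal loop produces exactly the first-occurrence distinct names,
-- each formatted with its total count in the original list.
theorem pv_altLoop_eq (names : List String) :
    pvAltLoop names =
      (PySem.List.dedup names).map (fun k => PySem.Int.toStr ((names.count k : Nat) : Int) ++ "x " ++ k) := by
  induction names using pvAltLoop.induct with
  | case1 => simp [pvAltLoop, PySem.List.dedup, PySem.Set.ofList]
  | case2 name t rest ih =>
    rw [pvAltLoop]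
    simp only [rest] at ih ⊢
    rw [ih, pv_dedup_cons, pv_len_sub]
    simp only [List.map_cons]
    congr 1
    apply List.map_congr_left
    intro k hk
    have hkmem : k ∈ (name :: t).filter (fun n => n ≠ name) := by
      have := (PySem.List.mem_dedup ((name :: t).filter (fun n => n ≠ name)) k).mp hk
      exact this
    have hkne : k ≠ name := by
      simp only [List.mem_filter, decide_not, Bool.not_eq_eq_eq_not] at hkmem
      simpa using hkmem.2
    have hcnt : ((name :: t).filter (fun n => n ≠ name)).count k = (name :: t).count k := by
      rw [List.count_filter]
      simp [hkne]
    rw [hcnt]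

-- ===== VERDICT (by name: the statement is the Claim_ definition above) =====
theorem parse_hardware_info_spec : Claim_equal_parse_hardware_info := by
  intro hi _
  unfold Spec_parse_hardware_info parse_hardware_info parse_hardware_info_alt
  cases hi with
  | none => rfl
  | some d =>
    simp only
    split_ifs with hd
    · rfl
    · cases hget : (PySem.Dict.mk d).get? "gpus" with
      | none => rfl
      | some gpus =>
        dsimp only
        split_ifs with hg
        · rfl
        · simp only [pv_count_loop_eq_counter, pv_foldl_append_fmt,
            PySem.Dict.items_counter, pv_altLoop_eq, PySem.List.dedup_eq_ofList, List.map_map]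
          rfl
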